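-- pv_equiv track=rewrite | github.com/PointMeAtTheDawn/MechabellumCounters | streamlit_app.py | classify_by_tier
-- ===== SOURCE A (Python) =====
-- def classify_by_tier(best_counters):
--     tier_bins = {
--         "S Tier (6 points)": [],
--         "A Tier (5 points)": [],
--         "B Tier (4 points)": [],
--         "C Tier (3 points)": [],
--         "D/E/F Tier (0-2 points)": [],
--     }
--
--     for unit, score in best_counters:
--         if score == 6:
--             tier_bins["S Tier (6 points)"].append(unit)
--         elif score == 5:
--             tier_bins["A Tier (5 points)"].append(unit)
--         elif score == 4:
--             tier_bins["B Tier (4 points)"].append(unit)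
--         elif score == 3:
--             tier_bins["C Tier (3 points)"].append(unit)
--         else:
--             tier_bins["D/E/F Tier (0-2 points)"].append(unit)
--
--     return tier_bins
-- ===== SOURCE B (Python) =====
-- def classify_by_tier(best_counters):
--     # Multi-pass: one targeted filter per tier, then assemble the dict at the end.
--     s_tier = [unit for unit, score in best_counters if score == 6]
--     a_tier = [unit for unit, score in best_counters if score == 5]
--     b_tier = [unit for unit, score in best_counters if score == 4]
--     c_tier = [unit for unit, score in best_counters if score == 3]
--     rest = [unit for unit, score in best_counters if score not in (3, 4, 5, 6)]
--     return {
--         "S Tier (6 points)": s_tier,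
--         "A Tier (5 points)": a_tier,
--         "B Tier (4 points)": b_tier,
--         "C Tier (3 points)": c_tier,
--         "D/E/F Tier (0-2 points)": rest,
--     }
-- ===== Notes on version B (the rewrite author's own statement) =====
-- stated objective: alternative
-- what changed: Replaces the single dispatch loop that appends into a mutable dict with five independent filter passes (one per tier) whose results are assembled into the dict at the end.
import Mathlib
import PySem

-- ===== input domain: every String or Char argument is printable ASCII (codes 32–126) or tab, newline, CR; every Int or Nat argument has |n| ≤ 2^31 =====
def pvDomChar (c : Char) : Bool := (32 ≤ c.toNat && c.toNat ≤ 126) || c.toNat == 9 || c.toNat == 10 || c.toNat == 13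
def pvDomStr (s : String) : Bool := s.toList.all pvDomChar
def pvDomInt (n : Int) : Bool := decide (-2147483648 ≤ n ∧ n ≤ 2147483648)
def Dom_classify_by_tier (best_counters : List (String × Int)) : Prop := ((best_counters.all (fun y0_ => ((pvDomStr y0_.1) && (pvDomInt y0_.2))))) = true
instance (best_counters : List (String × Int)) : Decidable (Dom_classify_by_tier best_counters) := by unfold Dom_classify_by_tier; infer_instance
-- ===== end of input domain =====

-- B replaces A's single dispatch loop over a mutable dict by five independent filter passes, one per tier (alternative decomposition, same cost).

-- ===== PORT A =====
-- the body of A's for-loop: dispatch on score, append unit to the matching bin of the dict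
def pvStepA (d : PySem.Dict String (List String)) (p : String × Int) : PySem.Dict String (List String) :=
  if p.2 == 6 then d.modify "S Tier (6 points)" [] (· ++ [p.1])
  else if p.2 == 5 then d.modify "A Tier (5 points)" [] (· ++ [p.1])
  else if p.2 == 4 then d.modify "B Tier (4 points)" [] (· ++ [p.1])
  else if p.2 == 3 then d.modify "C Tier (3 points)" [] (· ++ [p.1])
  else d.modify "D/E/F Tier (0-2 points)" [] (· ++ [p.1])

def classify_by_tier (best_counters : List (String × Int)) : List (String × List String) :=
  let tier_bins : PySem.Dict String (List String) :=
    (((((PySem.Dict.empty.insert "S Tier (6 points)" []).insert "A Tier (5 points)" []).insert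
        "B Tier (4 points)" []).insert "C Tier (3 points)" []).insert "D/E/F Tier (0-2 points)" [])
  (best_counters.foldl pvStepA tier_bins).items

-- ===== PORT B =====
def classify_by_tier_alt (best_counters : List (String × Int)) : List (String × List String) :=
  let s_tier := (best_counters.filter (fun p => p.2 == 6)).map (·.1)
  let a_tier := (best_counters.filter (fun p => p.2 == 5)).map (·.1)
  let b_tier := (best_counters.filter (fun p => p.2 == 4)).map (·.1)
  let c_tier := (best_counters.filter (fun p => p.2 == 3)).map (·.1)
  let rest := (best_counters.filter (fun p => !(p.2 == 3 || p.2 == 4 || p.2 == 5 || p.2 == 6))).map (·.1)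
  [("S Tier (6 points)", s_tier), ("A Tier (5 points)", a_tier), ("B Tier (4 points)", b_tier),
   ("C Tier (3 points)", c_tier), ("D/E/F Tier (0-2 points)", rest)]

-- ===== PRECONDITION & SPEC =====
def Spec_classify_by_tier (best_counters : List (String × Int)) (out : List (String × List String)) : Prop := out = classify_by_tier_alt best_counters
instance (best_counters : List (String × Int)) (out : List (String × List String)) : Decidable (Spec_classify_by_tier best_counters out) := by unfold Spec_classify_by_tier; infer_instance

-- ===== CLAIM (what is proved, stated in full; the proofs are below) =====
def Claim_equal_classify_by_tier : Prop := ∀ (best_counters : List (String × Int)), Dom_classify_by_tier best_counters → Spec_classify_by_tier best_counters (classify_by_tier best_counters)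

-- ===== LEMMAS AND PROOFS =====

-- invariant of A's loop: from an explicit five-bin dict, the fold appends each tier's filtered units to its bin
theorem pvFoldA_items (bc : List (String × Int)) (a1 a2 a3 a4 a5 : List String) :
    (bc.foldl pvStepA ⟨[("S Tier (6 points)", a1), ("A Tier (5 points)", a2),
        ("B Tier (4 points)", a3), ("C Tier (3 points)", a4), ("D/E/F Tier (0-2 points)", a5)]⟩).items
    = [("S Tier (6 points)", a1 ++ (bc.filter (fun p => p.2 == 6)).map (·.1)),
       ("A Tier (5 points)", a2 ++ (bc.filter (fun p => p.2 == 5)).map (·.1)),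
       ("B Tier (4 points)", a3 ++ (bc.filter (fun p => p.2 == 4)).map (·.1)),
       ("C Tier (3 points)", a4 ++ (bc.filter (fun p => p.2 == 3)).map (·.1)),
       ("D/E/F Tier (0-2 points)", a5 ++ (bc.filter (fun p => !(p.2 == 3 || p.2 == 4 || p.2 == 5 || p.2 == 6))).map (·.1))] := by
  induction bc generalizing a1 a2 a3 a4 a5 with
  | nil => simp
  | cons p t ih =>
    obtain ⟨u, sc⟩ := p
    by_cases h6 : sc = 6
    · subst h6
      show (t.foldl pvStepA _).items = _
      rw [show pvStepA ⟨[("S Tier (6 points)", a1), ("A Tier (5 points)", a2),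
            ("B Tier (4 points)", a3), ("C Tier (3 points)", a4), ("D/E/F Tier (0-2 points)", a5)]⟩ (u, 6)
          = ⟨[("S Tier (6 points)", a1 ++ [u]), ("A Tier (5 points)", a2),
            ("B Tier (4 points)", a3), ("C Tier (3 points)", a4), ("D/E/F Tier (0-2 points)", a5)]⟩ from rfl]
      rw [ih]
      simp
    · by_cases h5 : sc = 5
      · subst h5
        show (t.foldl pvStepA _).items = _
        rw [show pvStepA ⟨[("S Tier (6 points)", a1), ("A Tier (5 points)", a2),
              ("B Tier (4 points)", a3), ("C Tier (3 points)", a4), ("D/E/F Tier (0-2 points)", a5)]⟩ (u, 5)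
            = ⟨[("S Tier (6 points)", a1), ("A Tier (5 points)", a2 ++ [u]),
              ("B Tier (4 points)", a3), ("C Tier (3 points)", a4), ("D/E/F Tier (0-2 points)", a5)]⟩ from rfl]
        rw [ih]
        simp
      · by_cases h4 : sc = 4
        · subst h4
          show (t.foldl pvStepA _).items = _
          rw [show pvStepA ⟨[("S Tier (6 points)", a1), ("A Tier (5 points)", a2),
                ("B Tier (4 points)", a3), ("C Tier (3 points)", a4), ("D/E/F Tier (0-2 points)", a5)]⟩ (u, 4)
              = ⟨[("S Tier (6 points)", a1), ("A Tier (5 points)", a2),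
                ("B Tier (4 points)", a3 ++ [u]), ("C Tier (3 points)", a4), ("D/E/F Tier (0-2 points)", a5)]⟩ from rfl]
          rw [ih]
          simp
        · by_cases h3 : sc = 3
          · subst h3
            show (t.foldl pvStepA _).items = _
            rw [show pvStepA ⟨[("S Tier (6 points)", a1), ("A Tier (5 points)", a2),
                  ("B Tier (4 points)", a3), ("C Tier (3 points)", a4), ("D/E/F Tier (0-2 points)", a5)]⟩ (u, 3)
                = ⟨[("S Tier (6 points)", a1), ("A Tier (5 points)", a2),
                  ("B Tier (4 points)", a3), ("C Tier (3 points)", a4 ++ [u]), ("D/E/F Tier (0-2 points)", a5)]⟩ from rfl]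
            rw [ih]
            simp
          · show (t.foldl pvStepA (pvStepA _ (u, sc))).items = _
            have hstep : pvStepA ⟨[("S Tier (6 points)", a1), ("A Tier (5 points)", a2),
                  ("B Tier (4 points)", a3), ("C Tier (3 points)", a4), ("D/E/F Tier (0-2 points)", a5)]⟩ (u, sc)
                = ⟨[("S Tier (6 points)", a1), ("A Tier (5 points)", a2),
                  ("B Tier (4 points)", a3), ("C Tier (3 points)", a4), ("D/E/F Tier (0-2 points)", a5 ++ [u])]⟩ := by
              simp only [pvStepA]
              simp [h3, h4, h5, h6, PySem.Dict.modify, PySem.Dict.insert, PySem.Dict.contains,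
                PySem.Dict.getD, PySem.Dict.get?]
            rw [hstep, ih]
            simp [h3, h4, h5, h6]

-- ===== VERDICT (by name: the statement is the Claim_ definition above) =====
theorem classify_by_tier_spec : Claim_equal_classify_by_tier := by
  intro bc _
  show classify_by_tier bc = classify_by_tier_alt bc
  simpa [classify_by_tier, classify_by_tier_alt] using pvFoldA_items bc [] [] [] [] []
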